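-- pv_equiv track=rewrite | github.com/siakhooi/codility-jurassic-code-2022 | codility-solutions/solution-2.py | solution
-- ===== SOURCE A (Python) =====
-- def solution(X, Y, colors):
--     n = len(X)
--     ans = 0
--     tab = []
--     for i in range(n):
--         r2 = X[i]**2 + Y[i]**2
--         tab.append((r2, colors[i] == 'R'))
--         tab.sort()
--
--         cnt = red = 0
--     for i in range(n):
--         # r2 = tab[i][0]
--         cnt += 1
--         red += tab[i][1]
--         if(red*2 == cnt and
--                (i == n-1 or tab[i][0] != tab[i+1][0])):
--             ans = max(ans, cnt)
--     return ans
-- ===== SOURCE B (Python) =====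
-- def solution(X, Y, colors):
--     groups = {}
--     for x, y, c in zip(X, Y, colors):
--         r2 = x * x + y * y
--         cnt, red = groups.get(r2, (0, 0))
--         groups[r2] = (cnt + 1, red + (1 if c == 'R' else 0))
--     ans = tot = red = 0
--     for v in sorted(groups):
--         c, r = groups[v]
--         tot += c
--         red += r
--         if 2 * red == tot:
--             ans = max(ans, tot)
--     return ans
-- ===== Notes on version B (the rewrite author's own statement) =====
-- stated objective: faster
-- what changed: B replaces A's per-point loop that re-sorts the whole tuple list on every append and then scans all points with a run-boundary test by a one-pass dict aggregation (squared radius -> (count, red count)) followed by a single walk over the sorted distinct radii with running totals.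
import Mathlib
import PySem

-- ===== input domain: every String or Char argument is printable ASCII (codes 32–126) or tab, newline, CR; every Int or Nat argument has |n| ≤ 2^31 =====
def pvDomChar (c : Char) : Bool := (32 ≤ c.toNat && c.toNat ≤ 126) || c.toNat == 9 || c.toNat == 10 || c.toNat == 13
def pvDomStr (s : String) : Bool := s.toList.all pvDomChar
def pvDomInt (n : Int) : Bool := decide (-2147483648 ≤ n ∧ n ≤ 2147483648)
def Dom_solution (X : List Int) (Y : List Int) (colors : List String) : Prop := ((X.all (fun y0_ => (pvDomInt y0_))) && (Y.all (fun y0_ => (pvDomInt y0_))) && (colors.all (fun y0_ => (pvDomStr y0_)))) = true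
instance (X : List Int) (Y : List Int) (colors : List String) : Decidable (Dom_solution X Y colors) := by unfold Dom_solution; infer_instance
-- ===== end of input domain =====

-- B replaces A's repeatedly re-sorted point list and boundary-test scan over all points by a one-pass
-- dict aggregation per squared radius and a walk over the sorted distinct radii; objective: faster.

-- ===== PORT A =====
-- Python bool is an int (False < True sorts as 0 < 1, and 'red += tab[i][1]' adds it as an int):
-- the tuple's second component is ported as the Int 0/1. tab.sort() on tuples = sorted2 with keys fst, snd.
def solution (X : List Int) (Y : List Int) (colors : List String) : Int :=
  let n : Int := (X.length : Int)
  let tab : List (Int × Int) := (PySem.List.pyRange 0 n 1).foldl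
    (fun tab i =>
      let r2 := PySem.List.pyGetD X i 0 ^ 2 + PySem.List.pyGetD Y i 0 ^ 2
      PySem.List.sorted2 (tab ++ [(r2, if PySem.List.pyGetD colors i "" == "R" then (1 : Int) else 0)])
        (fun p => p.1) (fun p => p.2))
    []
  let s := (PySem.List.pyRange 0 n 1).foldl
    (fun (s : Int × Int × Int) i =>
      let cnt := s.2.1 + 1
      let red := s.2.2 + (PySem.List.pyGetD tab i (0, 0)).2
      let ans := if red * 2 = cnt ∧ (i = n - 1 ∨ (PySem.List.pyGetD tab i (0, 0)).1 ≠ (PySem.List.pyGetD tab (i + 1) (0, 0)).1)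
                 then max s.1 cnt else s.1
      (ans, cnt, red))
    ((0 : Int), (0 : Int), (0 : Int))
  s.1

-- ===== PORT B =====
def solution_alt (X : List Int) (Y : List Int) (colors : List String) : Int :=
  let groups : PySem.Dict Int (Int × Int) :=
    ((X.zip Y).zip colors).foldl
      (fun d q =>
        d.insert (q.1.1 * q.1.1 + q.1.2 * q.1.2)
          ((d.getD (q.1.1 * q.1.1 + q.1.2 * q.1.2) (0, 0)).1 + 1,
           (d.getD (q.1.1 * q.1.1 + q.1.2 * q.1.2) (0, 0)).2 + (if q.2 == "R" then 1 else 0)))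
      PySem.Dict.empty
  let s := (PySem.List.sorted (PySem.Dict.keys groups) (fun k => k)).foldl
    (fun (s : Int × Int × Int) v =>
      let tot := s.2.1 + (groups.getD v (0, 0)).1
      let red := s.2.2 + (groups.getD v (0, 0)).2
      (if 2 * red = tot then max s.1 tot else s.1, tot, red))
    ((0 : Int), (0 : Int), (0 : Int))
  s.1

-- ===== PRECONDITION & SPEC =====
-- A indexes Y[i] and colors[i] for i < len(X): it raises IndexError iff Y or colors is shorter than X.
def Pre_solution (X : List Int) (Y : List Int) (colors : List String) : Prop :=
  X.length ≤ Y.length ∧ X.length ≤ colors.length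
instance (X : List Int) (Y : List Int) (colors : List String) : Decidable (Pre_solution X Y colors) := by
  unfold Pre_solution; infer_instance
def pvWitness_solution : List Int × List Int × List String := ([0, 1, 1], [1, 0, 1], ["R", "B", "R"])


def Spec_solution (X : List Int) (Y : List Int) (colors : List String) (out : Int) : Prop := out = solution_alt X Y colors
instance (X : List Int) (Y : List Int) (colors : List String) (out : Int) : Decidable (Spec_solution X Y colors out) := by unfold Spec_solution; infer_instance

-- ===== CLAIM (what is proved, stated in full; the proofs are below) =====
def Claim_equal_solution : Prop := ∀ (X : List Int) (Y : List Int) (colors : List String), Dom_solution X Y colors → Pre_solution X Y colors → Spec_solution X Y colors (solution X Y colors)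

-- ===== LEMMAS AND PROOFS =====

-- the lexicographic ≤ Python uses on (r2, flag) tuples
def lexLE (a b : Int × Int) : Prop := a.1 < b.1 ∨ (a.1 = b.1 ∧ a.2 ≤ b.2)

-- running count of points with radius ≤ v, and of red points with radius ≤ v
def cntLE (pts : List (Int × Int)) (v : Int) : Int := ((pts.filter (fun p => decide (p.1 ≤ v))).length : Int)
def redLE (pts : List (Int × Int)) (v : Int) : Int := ((pts.filter (fun p => decide (p.1 ≤ v))).map (fun p => p.2)).sum

-- B's loop body, abstracted over the point multiset
def fB (pts : List (Int × Int)) (ans v : Int) : Int :=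
  if 2 * redLE pts v = cntLE pts v then max ans (cntLE pts v) else ans

-- structural form of A's second loop
def scan : List (Int × Int) → Int → Int → Int → Int
  | [], ans, _, _ => ans
  | p :: rest, ans, cnt, red =>
      scan rest
        (if (red + p.2) * 2 = cnt + 1 ∧ (rest = [] ∨ p.1 ≠ (rest.headI).1) then max ans (cnt + 1) else ans)
        (cnt + 1) (red + p.2)

-- last value of each run of equal radii (for a sorted list: the distinct radii, increasing)
def vals : List (Int × Int) → List Int
  | [] => []
  | [p] => [p.1]
  | p :: q :: t => if p.1 = q.1 then vals (q :: t) else p.1 :: vals (q :: t)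

theorem insertBy_pairwise (x : Int × Int) (ys : List (Int × Int)) (h : ys.Pairwise lexLE) :
    (PySem.List.insertBy (fun a b => decide (a.1 < b.1) || (!decide (b.1 < a.1) && decide (a.2 < b.2))) x ys).Pairwise lexLE := by
  induction ys with
  | nil => simp [PySem.List.insertBy]
  | cons y ys ih =>
    rw [List.pairwise_cons] at h
    simp only [PySem.List.insertBy]
    split_ifs with hb
    · simp only [Bool.or_eq_true, Bool.and_eq_true, decide_eq_true_eq, Bool.not_eq_true',
        decide_eq_false_iff_not] at hb
      refine List.Pairwise.cons ?_ (List.Pairwise.cons h.1 h.2)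
      intro b hb'
      rcases List.mem_cons.1 hb' with rfl | hbm
      · unfold lexLE; omega
      · have := h.1 b hbm
        unfold lexLE at *; omega
    · simp only [Bool.or_eq_true, Bool.and_eq_true, decide_eq_true_eq, Bool.not_eq_true',
        decide_eq_false_iff_not] at hb
      push Not at hb
      refine List.Pairwise.cons ?_ (ih h.2)
      intro b hb'
      rcases (PySem.List.mem_insertBy _ _ _ _).1 hb' with rfl | hbm
      · unfold lexLE; omega
      · exact h.1 b hbm

theorem foldl_insertBy_pairwise (xs acc : List (Int × Int)) (h : acc.Pairwise lexLE) :
    (xs.foldl (fun acc x => PySem.List.insertBy (fun a b => decide (a.1 < b.1) || (!decide (b.1 < a.1) && decide (a.2 < b.2))) x acc) acc).Pairwise lexLE := by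
  induction xs generalizing acc with
  | nil => exact h
  | cons x xs ih => exact ih _ (insertBy_pairwise x acc h)

theorem sorted2_pairwise (xs : List (Int × Int)) :
    (PySem.List.sorted2 xs (fun p => p.1) (fun p => p.2)).Pairwise lexLE := by
  have := foldl_insertBy_pairwise xs [] List.Pairwise.nil
  simpa [PySem.List.sorted2] using this

theorem sort_loop (l : List Int) (g : Int → Int × Int) (acc : List (Int × Int)) :
    (l.foldl (fun acc i => PySem.List.sorted2 (acc ++ [g i]) (fun p => p.1) (fun p => p.2)) acc).Perm (acc ++ l.map g) ∧
    ((acc.Pairwise lexLE) → (l.foldl (fun acc i => PySem.List.sorted2 (acc ++ [g i]) (fun p => p.1) (fun p => p.2)) acc).Pairwise lexLE) := by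
  induction l generalizing acc with
  | nil => simp
  | cons i l ih =>
    simp only [List.foldl_cons, List.map_cons]
    set acc' := PySem.List.sorted2 (acc ++ [g i]) (fun p => p.1) (fun p => p.2) with hacc'
    have hperm : acc'.Perm (acc ++ [g i]) := PySem.List.sorted2_perm _ _ _ _
    refine ⟨?_, ?_⟩
    · exact ((ih acc').1).trans (hperm.append_right _ |>.trans (by simp))
    · intro _
      refine (ih acc').2 ?_
      rw [hacc']
      exact sorted2_pairwise _

-- A's indexed loop equals the structural scan
theorem loop2_eq_scan (tab : List (Int × Int)) (l : List (Int × Int)) (k : Nat)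
    (hd : tab.drop k = l) (hk : k + l.length = tab.length) (a c r : Int) :
    ((PySem.List.pyRange (k : Int) (tab.length : Int) 1).foldl
      (fun (s : Int × Int × Int) i =>
        let cnt := s.2.1 + 1
        let red := s.2.2 + (PySem.List.pyGetD tab i (0, 0)).2
        let ans := if red * 2 = cnt ∧ (i = (tab.length : Int) - 1 ∨ (PySem.List.pyGetD tab i (0, 0)).1 ≠ (PySem.List.pyGetD tab (i + 1) (0, 0)).1)
                   then max s.1 cnt else s.1
        (ans, cnt, red)) (a, c, r)).1 = scan l a c r := by
  induction l generalizing k a c r with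
  | nil =>
    simp only [List.length_nil, Nat.add_zero] at hk
    rw [hk, PySem.List.pyRange_one_eq_nil le_rfl]
    rfl
  | cons p l' ih =>
    have hklt : k < tab.length := by simp at hk; omega
    have hgetk : tab[k] = p := by
      have := List.drop_eq_getElem_cons hklt
      rw [hd] at this
      exact (List.cons.injEq .. ▸ this).1.symm
    have hd' : tab.drop (k + 1) = l' := by
      have := List.drop_eq_getElem_cons hklt
      rw [hd] at this
      exact ((List.cons.injEq .. ▸ this).2).symm
    rw [PySem.List.pyRange_one_cons (by exact_mod_cast hklt), List.foldl_cons]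
    have hget : PySem.List.pyGetD tab (k : Int) ((0 : Int), (0 : Int)) = p := by
      rw [PySem.List.pyGetD_eq_getElem tab _ (by positivity) (by exact_mod_cast hklt)]
      simpa using hgetk
    have hcond : ((k : Int) = (tab.length : Int) - 1 ∨ p.1 ≠ (PySem.List.pyGetD tab (((k + 1 : Nat)) : Int) (0, 0)).1)
        ↔ (l' = [] ∨ p.1 ≠ (l'.headI).1) := by
      match l', hk, hd' with
      | [], hk, _ =>
        simp only [List.length_cons, List.length_nil] at hk
        constructor
        · intro _; exact Or.inl rfl
        · intro _; exact Or.inl (by omega)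
      | q :: t, hk, hd' =>
        have hk1 : k + 1 < tab.length := by simp at hk; omega
        have hgetk1 : PySem.List.pyGetD tab (((k + 1 : Nat)) : Int) ((0 : Int), (0 : Int)) = q := by
          rw [PySem.List.pyGetD_eq_getElem tab _ (by positivity) (by exact_mod_cast hk1)]
          have h2 := List.drop_eq_getElem_cons hk1
          rw [hd'] at h2
          simpa using ((List.cons.injEq .. ▸ h2).1).symm
        rw [hgetk1]
        have hne : ¬ ((k : Int) = (tab.length : Int) - 1) := by
          simp only [List.length_cons] at hk
          omega
        simp only [hne, false_or, List.headI]
        exact ⟨fun h => Or.inr h, fun h => h.resolve_left (by simp)⟩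
    rw [scan]
    have harith : ((k : Int) + 1) = ((k + 1 : Nat) : Int) := by push_cast; ring
    show (List.foldl _ (_, _, _) (PySem.List.pyRange ((k:Int)+1) (tab.length : Int) 1)).1 = _
    rw [harith]
    rw [ih (k+1) hd' (by simp at hk ⊢; omega)]
    simp only [hget]
    congr 1
    exact if_congr (and_congr_right' hcond) rfl rfl

-- the scan over a sorted list computes the fold of fB over the run-end values
theorem scan_eq_foldl (full : List (Int × Int)) (hp : full.Pairwise lexLE) :
    ∀ rest done, full = done ++ rest → ∀ ans,
      scan rest ans (done.length : Int) ((done.map (fun p => p.2)).sum) = (vals rest).foldl (fB full) ans := by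
  intro rest
  induction rest with
  | nil => intro done _ ans; simp [scan, vals]
  | cons p rest' ih =>
    intro done hfull ans
    have hdone_le : ∀ d ∈ done, d.1 ≤ p.1 := by
      intro d hd
      rw [hfull, List.pairwise_append] at hp
      have := hp.2.2 d hd p (by simp)
      unfold lexLE at this; omega
    have hrest : (p :: rest').Pairwise lexLE := by
      rw [hfull, List.pairwise_append] at hp; exact hp.2.1
    by_cases hb : rest' = [] ∨ p.1 ≠ (rest'.headI).1
    · -- boundary: the run of p.1 ends here
      have hgt : ∀ x ∈ rest', p.1 < x.1 := by
        intro x hx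
        rcases hb with hb | hb
        · subst hb; simp at hx
        · match rest', hx with
          | q :: t, hx =>
            simp only [List.headI] at hb
            rw [List.pairwise_cons] at hrest
            have hpq := hrest.1 q (by simp)
            rcases List.mem_cons.1 hx with rfl | hx
            · unfold lexLE at hpq; omega
            · have h2 := hrest.2
              rw [List.pairwise_cons] at h2
              have hqx := h2.1 x hx
              unfold lexLE at hpq hqx; omega
      have hfilter : full.filter (fun q => decide (q.1 ≤ p.1)) = done ++ [p] := by
        rw [hfull]
        rw [List.filter_append]
        rw [List.filter_eq_self.2 (by intro a ha; simpa using hdone_le a ha)]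
        simp only [List.filter_cons, decide_eq_true_eq]
        rw [if_pos le_rfl]
        rw [List.filter_eq_nil_iff.2 (by intro a ha; simp only [decide_eq_true_eq]; exact not_le.2 (hgt a ha))]
      have hcnt : cntLE full p.1 = (done.length : Int) + 1 := by
        unfold cntLE; rw [hfilter]; simp
      have hred : redLE full p.1 = (done.map (fun p => p.2)).sum + p.2 := by
        unfold redLE; rw [hfilter]; simp
      have hvals : vals (p :: rest') = p.1 :: vals rest' := by
        match rest', hb with
        | [], _ => rfl
        | q :: t, hb =>
          have : p.1 ≠ q.1 := by simpa [List.headI] using hb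
          rw [vals, if_neg this]
      rw [hvals, List.foldl_cons, scan]
      have hif : (if ((done.map (fun p => p.2)).sum + p.2) * 2 = (done.length : Int) + 1 ∧ (rest' = [] ∨ p.1 ≠ (rest'.headI).1)
                  then max ans ((done.length : Int) + 1) else ans) = fB full ans p.1 := by
        unfold fB
        rw [hcnt, hred]
        by_cases hc : ((done.map (fun p => p.2)).sum + p.2) * 2 = (done.length : Int) + 1
        · rw [if_pos ⟨hc, hb⟩, if_pos (by omega)]
        · rw [if_neg (by tauto), if_neg (by omega)]
      rw [hif]
      have := ih (done ++ [p]) (by rw [hfull]; simp) (fB full ans p.1)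
      simpa using this
    · -- mid-run: p.1 continues in rest'
      match rest', hb with
      | [], hb => exact absurd (Or.inl rfl) hb
      | q :: t, hb =>
        push Not at hb
        have hpq : p.1 = q.1 := by simpa [List.headI] using hb.2
        have hvals : vals (p :: q :: t) = vals (q :: t) := by rw [vals, if_pos hpq]
        rw [hvals, scan]
        rw [if_neg (by push Not; intro _; exact ⟨by simp, by simpa [List.headI] using hpq⟩)]
        have := ih (done ++ [p]) (by rw [hfull]; simp) ans
        simpa using this

theorem mem_vals (s : List (Int × Int)) (v : Int) : v ∈ vals s ↔ v ∈ s.map (fun p => p.1) := by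
  induction s using vals.induct with
  | case1 => simp [vals]
  | case2 p => simp [vals]
  | case3 p q t h ih =>
    rw [vals, if_pos h]
    simp only [List.map_cons, List.mem_cons] at *
    constructor
    · intro hv; right; exact ih.1 hv
    · rintro (rfl | hv)
      · exact ih.2 (by simp [h])
      · exact ih.2 hv
  | case4 p q t h ih =>
    rw [vals, if_neg h]
    simp only [List.map_cons, List.mem_cons] at *
    rw [ih]

theorem vals_pairwise (s : List (Int × Int)) (h : s.Pairwise lexLE) : (vals s).Pairwise (· < ·) := by
  induction s using vals.induct with
  | case1 => simp [vals]
  | case2 p => simp [vals]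
  | case3 p q t hpq ih =>
    rw [vals, if_pos hpq]
    exact ih h.of_cons
  | case4 p q t hpq ih =>
    rw [vals, if_neg hpq]
    refine List.Pairwise.cons ?_ (ih h.of_cons)
    intro b hb
    have hbm := (mem_vals _ b).1 hb
    simp only [List.map_cons, List.mem_cons] at hbm
    rw [List.pairwise_cons] at h
    have hq := h.1 q (by simp)
    rcases hbm with rfl | hbm
    · unfold lexLE at hq; omega
    · simp only [List.mem_map] at hbm
      obtain ⟨x, hx, rfl⟩ := hbm
      have h2 := h.2
      rw [List.pairwise_cons] at h2
      have hqx := h2.1 x hx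
      unfold lexLE at hq hqx
      omega

-- fB only depends on the multiset of points
theorem fB_perm {pts pts' : List (Int × Int)} (h : pts.Perm pts') : fB pts = fB pts' := by
  funext ans v
  have hf := h.filter (fun p => decide (p.1 ≤ v))
  unfold fB cntLE redLE
  rw [hf.length_eq, (hf.map (fun p => p.2)).sum_eq]

theorem foldl_fB_perm (pts : List (Int × Int)) {l l' : List Int} (h : l.Perm l') (a : Int) :
    l.foldl (fB pts) a = l'.foldl (fB pts) a := by
  refine h.foldl_eq' ?_ a
  intro x _ y _ z
  unfold fB
  split_ifs <;> first | rfl | exact max_right_comm _ _ _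

-- ===== VERDICT (by name: the statement is the Claim_ definition above) =====
def cntEQ (pts : List (Int × Int)) (v : Int) : Int := (pts.countP (fun p => decide (p.1 = v)) : Int)
def redEQ (pts : List (Int × Int)) (v : Int) : Int := ((pts.filter (fun p => decide (p.1 = v))).map (fun p => p.2)).sum
def cntNI (pts : List (Int × Int)) (ks : List Int) : Int := (pts.countP (fun p => decide (p.1 ∉ ks)) : Int)
def redNI (pts : List (Int × Int)) (ks : List Int) : Int := ((pts.filter (fun p => decide (p.1 ∉ ks))).map (fun p => p.2)).sum

theorem getD_build {β : Type} (key : β → Int) (w : β → Int) (l : List β) :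
    ∀ (d : PySem.Dict Int (Int × Int)) (v : Int),
    (l.foldl (fun d q => d.insert (key q)
        ((d.getD (key q) (0, 0)).1 + 1, (d.getD (key q) (0, 0)).2 + w q)) d).getD v (0, 0)
    = ((d.getD v (0, 0)).1 + (l.countP (fun q => decide (key q = v)) : Int),
       (d.getD v (0, 0)).2 + ((l.filter (fun q => decide (key q = v))).map w).sum) := by
  induction l with
  | nil => intro d v; simp
  | cons q l ih =>
    intro d v
    simp only [List.foldl_cons]
    rw [ih]
    rw [PySem.Dict.getD_insert]
    by_cases h : v = key q
    · subst h
      rw [if_pos rfl]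
      simp only [List.countP_cons, List.filter_cons, decide_eq_true_eq, if_pos rfl,
        decide_true, if_true, List.map_cons, List.sum_cons]
      refine Prod.ext ?_ ?_ <;> simp <;> push_cast <;> ring
    · rw [if_neg h]
      simp only [List.countP_cons, List.filter_cons, decide_eq_true_eq,
        if_neg (fun hh : key q = v => h hh.symm), List.map_cons]
      simp
  
theorem cnt_split (v : Int) (ks : List Int) (hv : v ∉ ks) (pts : List (Int × Int)) :
    cntNI pts (v :: ks) + cntEQ pts v = cntNI pts ks := by
  induction pts with
  | nil => simp [cntNI, cntEQ]
  | cons x l ih =>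
    unfold cntNI cntEQ at *
    simp only [List.countP_cons, List.mem_cons, decide_eq_true_eq]
    by_cases h1 : x.1 = v <;> by_cases h2 : x.1 ∈ ks <;>
      simp [h1, h2, hv] at * <;> push_cast <;> omega

theorem red_split (v : Int) (ks : List Int) (hv : v ∉ ks) (pts : List (Int × Int)) :
    redNI pts (v :: ks) + redEQ pts v = redNI pts ks := by
  induction pts with
  | nil => simp [redNI, redEQ]
  | cons x l ih =>
    unfold redNI redEQ at *
    simp only [List.filter_cons, List.mem_cons, decide_eq_true_eq]
    by_cases h1 : x.1 = v <;> by_cases h2 : x.1 ∈ ks <;>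
      simp [h1, h2, hv] at * <;> push_cast <;> omega

theorem walk (full : List (Int × Int)) :
    ∀ ks : List Int, ks.Pairwise (· < ·) →
      (∀ x ∈ full, x.1 ∈ ks ∨ (∀ k ∈ ks, x.1 < k)) →
      ∀ ans : Int,
      (ks.foldl (fun (s : Int × Int × Int) v =>
          (if 2 * (s.2.2 + redEQ full v) = s.2.1 + cntEQ full v
           then max s.1 (s.2.1 + cntEQ full v) else s.1,
           s.2.1 + cntEQ full v, s.2.2 + redEQ full v))
        (ans, cntNI full ks, redNI full ks)).1 = ks.foldl (fB full) ans := by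
  intro ks
  induction ks with
  | nil => intro _ _ ans; rfl
  | cons v ks ih =>
    intro hp hInv ans
    have hvks : v ∉ ks := fun hm => lt_irrefl v ((List.pairwise_cons.1 hp).1 v hm)
    have hle : ∀ x ∈ full, (x.1 ∉ ks) ↔ x.1 ≤ v := by
      intro x hx
      constructor
      · intro hni
        rcases hInv x hx with hmem | hlt
        · rcases List.mem_cons.1 hmem with he | hm
          · exact le_of_eq he
          · exact absurd hm hni
        · exact le_of_lt (hlt v (by simp))
      · intro hxv hm
        exact absurd hxv (not_le.2 ((List.pairwise_cons.1 hp).1 _ hm))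
    have hcnt : cntNI full (v :: ks) + cntEQ full v = cntLE full v := by
      rw [cnt_split v ks hvks]
      unfold cntNI cntLE
      rw [List.countP_eq_length_filter]
      congr 2
      apply List.filter_congr
      intro x hx
      simp only [decide_eq_decide]
      exact hle x hx
    have hred : redNI full (v :: ks) + redEQ full v = redLE full v := by
      rw [red_split v ks hvks]
      unfold redNI redLE
      congr 2
      apply List.filter_congr
      intro x hx
      simp only [decide_eq_decide]
      exact hle x hx
    have hcnt' : cntNI full (v :: ks) + cntEQ full v = cntNI full ks := cnt_split v ks hvks full
    have hred' : redNI full (v :: ks) + redEQ full v = redNI full ks := red_split v ks hvks full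
    simp only [List.foldl_cons]
    rw [show (if 2 * (redNI full (v :: ks) + redEQ full v) = cntNI full (v :: ks) + cntEQ full v
            then max ans (cntNI full (v :: ks) + cntEQ full v) else ans) = fB full ans v by
      unfold fB; rw [hcnt, hred]]
    rw [hcnt', hred']
    refine ih hp.of_cons ?_ (fB full ans v)
    intro x hx
    rcases hInv x hx with hmem | hlt
    · rcases List.mem_cons.1 hmem with he | hm
      · refine Or.inr ?_
        intro k hk
        rw [he] at *
        exact (List.pairwise_cons.1 hp).1 k hk
      · exact Or.inl hm
    · exact Or.inr fun k hk => hlt k (by simp [hk])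

-- the two point lists coincide under Pre_
theorem map_g_eq (X Y : List Int) (colors : List String)
    (hY : X.length ≤ Y.length) (hC : X.length ≤ colors.length) :
    (PySem.List.pyRange 0 (X.length : Int) 1).map
      (fun i => (PySem.List.pyGetD X i 0 ^ 2 + PySem.List.pyGetD Y i 0 ^ 2,
                 if PySem.List.pyGetD colors i "" == "R" then (1 : Int) else 0))
    = ((X.zip Y).zip colors).map
        (fun q => (q.1.1 * q.1.1 + q.1.2 * q.1.2, if q.2 == "R" then (1 : Int) else 0)) := by
  apply List.ext_getElem
  · simp [PySem.List.length_pyRange_one, List.length_zip]; omega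
  · intro i h1 h2
    have hi : i < X.length := by
      simp only [List.length_map, List.length_zip] at h2; omega
    have hiz : i < ((X.zip Y).zip colors).length := by
      simp [List.length_zip]; omega
    have hixy : i < (X.zip Y).length := by simp [List.length_zip]; omega
    rw [List.getElem_map, PySem.List.getElem_pyRange_one]
    rw [List.getElem_map, List.getElem_zip, List.getElem_zip]
    rw [PySem.List.pyGetD_eq_getElem X _ (by positivity) (by omega)]
    rw [PySem.List.pyGetD_eq_getElem Y _ (by positivity) (by omega)]
    rw [PySem.List.pyGetD_eq_getElem colors _ (by positivity) (by omega)]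
    simp only [zero_add, Int.toNat_natCast]
    simp [pow_two]

-- ===== VERDICT (by name: the statement is the Claim_ definition above) =====
theorem solution_spec : Claim_equal_solution := by
  unfold Claim_equal_solution
  intro X Y colors _ hpre
  obtain ⟨hY, hC⟩ := hpre
  unfold Spec_solution solution solution_alt
  simp only []
  generalize htab : (PySem.List.pyRange 0 (X.length : Int) 1).foldl
      (fun tab i => PySem.List.sorted2
        (tab ++ [(PySem.List.pyGetD X i 0 ^ 2 + PySem.List.pyGetD Y i 0 ^ 2,
                  if PySem.List.pyGetD colors i "" == "R" then (1 : Int) else 0)])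
        (fun p => p.1) (fun p => p.2)) [] = tab
  have hsort := sort_loop (PySem.List.pyRange 0 (X.length : Int) 1)
      (fun i => (PySem.List.pyGetD X i 0 ^ 2 + PySem.List.pyGetD Y i 0 ^ 2,
                 if PySem.List.pyGetD colors i "" == "R" then (1 : Int) else 0)) []
  rw [htab] at hsort
  have hperm : tab.Perm (((X.zip Y).zip colors).map
      (fun q => (q.1.1 * q.1.1 + q.1.2 * q.1.2, if q.2 == "R" then (1 : Int) else 0))) := by
    have := hsort.1
    rw [map_g_eq X Y colors hY hC] at this
    simpa using this
  have hpair : tab.Pairwise lexLE := hsort.2 List.Pairwise.nil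
  set ptsAll := ((X.zip Y).zip colors).map
      (fun q => (q.1.1 * q.1.1 + q.1.2 * q.1.2, if q.2 == "R" then (1 : Int) else 0)) with hpts
  have hlen : tab.length = X.length := by
    rw [hperm.length_eq, hpts]
    simp [List.length_zip]; omega
  have hcast : (X.length : Int) = (tab.length : Int) := by rw [hlen]
  rw [hcast]
  have hloop := loop2_eq_scan tab tab 0 (by simp) (by simp) 0 0 0
  norm_num at hloop
  rw [hloop]
  have hscan := scan_eq_foldl tab hpair tab [] rfl 0
  norm_num at hscan
  rw [hscan]
  rw [fB_perm hperm]
  -- B side: the dictionary holds exactly the per-radius group counts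
  generalize hgr : ((X.zip Y).zip colors).foldl
      (fun d q => d.insert (q.1.1 * q.1.1 + q.1.2 * q.1.2)
        ((d.getD (q.1.1 * q.1.1 + q.1.2 * q.1.2) (0, 0)).1 + 1,
         (d.getD (q.1.1 * q.1.1 + q.1.2 * q.1.2) (0, 0)).2 + (if q.2 == "R" then 1 else 0)))
      (PySem.Dict.empty : PySem.Dict Int (Int × Int)) = groups
  have hkeys : groups.keys = PySem.Set.ofList
      (((X.zip Y).zip colors).map (fun q => q.1.1 * q.1.1 + q.1.2 * q.1.2)) := by
    rw [← hgr]
    rw [PySem.Dict.keys_foldl_insert_key ((X.zip Y).zip colors)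
      (fun q => q.1.1 * q.1.1 + q.1.2 * q.1.2)
      (fun d q => ((d.getD (q.1.1 * q.1.1 + q.1.2 * q.1.2) (0, 0)).1 + 1,
        (d.getD (q.1.1 * q.1.1 + q.1.2 * q.1.2) (0, 0)).2 + (if q.2 == "R" then 1 else 0)))]
    rw [PySem.Dict.keys_empty, PySem.Set.update_nil_left]
  have hmapkey : ((X.zip Y).zip colors).map (fun q => q.1.1 * q.1.1 + q.1.2 * q.1.2)
      = ptsAll.map Prod.fst := by
    rw [hpts, List.map_map]
    rfl
  have hgetD : ∀ v : Int, groups.getD v (0, 0) = (cntEQ ptsAll v, redEQ ptsAll v) := by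
    intro v
    rw [← hgr, getD_build (fun q : (Int × Int) × String => q.1.1 * q.1.1 + q.1.2 * q.1.2)
      (fun q : (Int × Int) × String => if q.2 == "R" then (1 : Int) else 0)]
    unfold cntEQ redEQ
    rw [hpts]
    simp only [PySem.Dict.getD_empty, List.countP_map, List.filter_map, List.map_map, zero_add]
    rfl
  have hkpair : (PySem.List.sorted (PySem.Dict.keys groups) (fun k => k)).Pairwise (· < ·) := by
    rw [hkeys]
    exact PySem.List.sorted_ofList_pairwise_lt _
  have hkmem : ∀ v : Int, v ∈ PySem.List.sorted (PySem.Dict.keys groups) (fun k => k)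
      ↔ v ∈ ptsAll.map Prod.fst := by
    intro v
    rw [PySem.List.mem_sorted, hkeys, PySem.Set.mem_ofList, hmapkey]
  have hbody : (PySem.List.sorted (PySem.Dict.keys groups) (fun k => k)).foldl
      (fun (s : Int × Int × Int) v =>
        (if 2 * (s.2.2 + (groups.getD v (0, 0)).2) = s.2.1 + (groups.getD v (0, 0)).1
         then max s.1 (s.2.1 + (groups.getD v (0, 0)).1) else s.1,
         s.2.1 + (groups.getD v (0, 0)).1, s.2.2 + (groups.getD v (0, 0)).2))
      (0, 0, 0)
      = (PySem.List.sorted (PySem.Dict.keys groups) (fun k => k)).foldl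
      (fun (s : Int × Int × Int) v =>
        (if 2 * (s.2.2 + redEQ ptsAll v) = s.2.1 + cntEQ ptsAll v
         then max s.1 (s.2.1 + cntEQ ptsAll v) else s.1,
         s.2.1 + cntEQ ptsAll v, s.2.2 + redEQ ptsAll v)) (0, 0, 0) := by
    apply PySem.List.foldl_congr_mem
    intro acc v _
    simp only [hgetD v]
  have h0c : cntNI ptsAll (PySem.List.sorted (PySem.Dict.keys groups) (fun k => k)) = 0 := by
    unfold cntNI
    rw [List.countP_eq_zero.2]
    · rfl
    · intro p hp
      simp only [decide_eq_true_eq, not_not]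
      exact (hkmem p.1).2 (List.mem_map_of_mem hp)
  have h0r : redNI ptsAll (PySem.List.sorted (PySem.Dict.keys groups) (fun k => k)) = 0 := by
    unfold redNI
    rw [List.filter_eq_nil_iff.2]
    · rfl
    · intro p hp
      simp only [decide_eq_true_eq, not_not]
      exact (hkmem p.1).2 (List.mem_map_of_mem hp)
  have hwalk := walk ptsAll (PySem.List.sorted (PySem.Dict.keys groups) (fun k => k)) hkpair
    (fun x hx => Or.inl ((hkmem x.1).2 (List.mem_map_of_mem hx))) 0
  rw [h0c, h0r] at hwalk
  rw [hbody, hwalk]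
  apply foldl_fB_perm
  refine (List.perm_ext_iff_of_nodup ?_ ?_).2 ?_
  · exact ((vals_pairwise tab hpair).imp (fun h => ne_of_lt h))
  · exact hkpair.imp (fun h => ne_of_lt h)
  · intro v
    rw [mem_vals, hkmem v]
    constructor
    · intro hv
      rcases List.mem_map.1 hv with ⟨x, hx, rfl⟩
      exact List.mem_map.2 ⟨x, hperm.mem_iff.1 hx, rfl⟩
    · intro hv
      rcases List.mem_map.1 hv with ⟨x, hx, rfl⟩
      exact List.mem_map.2 ⟨x, hperm.mem_iff.2 hx, rfl⟩
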